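-- pv_equiv track=rewrite | github.com/Saikatriki2004/GeeksforGeeks | September_2024/Sep_10.py | isCircle
-- ===== SOURCE A (Python) =====
-- def isCircle(arr):
--     from collections import defaultdict
--
--     # Create adjacency list based on the first and last character of each string
--     in_degree = defaultdict(int)
--     out_degree = defaultdict(int)
--     graph = defaultdict(list)
--
--     # Build the graph
--     for word in arr:
--         start, end = word[0], word[-1]
--         graph[start].append(end)
--         out_degree[start] += 1
--         in_degree[end] += 1
--
--     # Check if in-degree and out-degree are balanced for all characters
--     for node in set(in_degree) | set(out_degree):
--         if in_degree[node] != out_degree[node]: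
--             return 0  # If they are not equal, circle is not possible
--
--     # Function to perform DFS
--     def dfs(node, visited):
--         visited.add(node)
--         for neighbor in graph[node]:
--             if neighbor not in visited:
--                 dfs(neighbor, visited)
--
--     # Start DFS from the first character of the first word
--     visited = set()
--     start_char = arr[0][0]
--     dfs(start_char, visited)
--
--     # Check if all unique characters were visited (graph is connected)
--     unique_chars = set(in_degree.keys()) | set(out_degree.keys())
--     if len(visited) == len(unique_chars):
--         return 1
--     else:
--         return 0
-- ===== SOURCE B (Python) =====
-- def isCircle(arr):
--     # One pass over (first,last) pairs keeping a single net-balance counter,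
--     # then fixed-round frontier saturation instead of recursive DFS.
--     edges = [(w[0], w[-1]) for w in arr]
--     balance = {}
--     for a, b in edges:
--         balance[a] = balance.get(a, 0) + 1
--         balance[b] = balance.get(b, 0) - 1
--     if any(v != 0 for v in balance.values()):
--         return 0
--     visited = {arr[0][0]}
--     for _ in range(len(balance)):
--         visited |= {b for a, b in edges if a in visited}
--     return 1 if all(a in visited and b in visited for a, b in edges) else 0
-- ===== Notes on version B (the rewrite author's own statement) =====
-- stated objective: alternative
-- what changed: B replaces A's three defaultdicts and recursive DFS by one pass keeping a single net-balance counter (out minus in) per character and an iterative fixed-round frontier saturation over the (first,last) edge pairs, checking at the end that every edge endpoint was reached.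
import Mathlib
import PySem

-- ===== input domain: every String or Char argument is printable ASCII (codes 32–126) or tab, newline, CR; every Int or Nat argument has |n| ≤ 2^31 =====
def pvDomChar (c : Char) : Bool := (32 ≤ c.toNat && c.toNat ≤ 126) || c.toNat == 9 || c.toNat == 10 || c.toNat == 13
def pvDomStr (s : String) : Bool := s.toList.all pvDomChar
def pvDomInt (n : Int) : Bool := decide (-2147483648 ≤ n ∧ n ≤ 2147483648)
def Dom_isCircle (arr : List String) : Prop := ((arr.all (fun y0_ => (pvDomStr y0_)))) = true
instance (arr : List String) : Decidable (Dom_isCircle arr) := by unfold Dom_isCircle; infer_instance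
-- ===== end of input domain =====

-- B replaces A's defaultdict build + recursive DFS by a single net-balance counter and
-- an iterative fixed-round frontier saturation over the (first,last) pairs (objective: alternative).


-- ===== PORT A =====
-- word[0] / word[-1]; the .getD ' ' default is never reached inside Pre_ (words nonempty)
def pvFirst (w : String) : Char := (PySem.Str.pyGet? w 0).getD ' '
def pvLast (w : String) : Char := (PySem.Str.pyGet? w (-1)).getD ' '

-- A's recursive dfs, fuel-guarded for totality; fuel 2*len(arr)+1 exceeds the number of
-- distinct characters, so it never runs out (proved below via pvDfsA_closed)
def pvDfsA (graph : PySem.Dict Char (List Char)) (fuel : Nat) (node : Char) (visited : PySem.Set Char) : PySem.Set Char :=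
  match fuel with
  | 0 => visited
  | f+1 =>
    (graph.getD node []).foldl (fun vis nb => if nb ∈ vis then vis else pvDfsA graph f nb vis)
      (PySem.Set.add visited node)

def isCircle (arr : List String) : Int :=
  let st := arr.foldl
    (fun st word =>
      let s := pvFirst word
      let e := pvLast word
      (st.1.modify e 0 (· + 1), st.2.1.modify s 0 (· + 1), st.2.2.modify s [] (· ++ [e])))
    ((PySem.Dict.empty : PySem.Dict Char Int), (PySem.Dict.empty : PySem.Dict Char Int),
     (PySem.Dict.empty : PySem.Dict Char (List Char)))
  let ind := st.1
  let outd := st.2.1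
  let graph := st.2.2
  let nodes : PySem.Set Char := PySem.Set.union (PySem.Set.ofList ind.keys) outd.keys
  if nodes.any (fun node => ind.getD node 0 != outd.getD node 0) then 0
  else
    let startChar := pvFirst (arr.headD "")   -- arr[0][0]; Pre_ excludes arr = []
    let visited := pvDfsA graph (2 * arr.length + 1) startChar PySem.Set.empty
    if visited.length = nodes.length then 1 else 0

-- ===== PORT B =====
def isCircle_alt (arr : List String) : Int :=
  let edges := arr.map (fun w => (pvFirst w, pvLast w))
  let balance := edges.foldl
    (fun d p =>
      let d := d.insert p.1 (d.getD p.1 0 + 1)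
      d.insert p.2 (d.getD p.2 0 - 1))
    (PySem.Dict.empty : PySem.Dict Char Int)
  if balance.values.any (fun v => v != 0) then 0
  else
    let startChar := pvFirst (arr.headD "")   -- arr[0][0]; Pre_ excludes arr = []
    let visited := (List.range balance.size).foldl
      (fun vis _ => edges.foldl (fun v p => if p.1 ∈ vis then PySem.Set.add v p.2 else v) vis)
      (PySem.Set.ofList [startChar])
    if edges.all (fun p => decide (p.1 ∈ visited) && decide (p.2 ∈ visited)) then 1 else 0

-- ===== PRECONDITION & SPEC =====
-- Pre_ excludes the empty list and empty words: there Python A raises IndexError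
-- (arr[0][0] resp. word[0]); Python B raises on exactly the same inputs.
def Pre_isCircle (arr : List String) : Prop := arr ≠ [] ∧ ∀ w ∈ arr, w ≠ ""
instance (arr : List String) : Decidable (Pre_isCircle arr) := by unfold Pre_isCircle; infer_instance
def pvWitness_isCircle : List String := ["ab", "ba"]

def Spec_isCircle (arr : List String) (out : Int) : Prop := out = isCircle_alt arr
instance (arr : List String) (out : Int) : Decidable (Spec_isCircle arr out) := by unfold Spec_isCircle; infer_instance

-- ===== CLAIM (what is proved, stated in full; the proofs are below) =====
def Claim_equal_isCircle : Prop := ∀ (arr : List String), Dom_isCircle arr → Pre_isCircle arr → Spec_isCircle arr (isCircle arr)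

-- ===== LEMMAS AND PROOFS =====

-- Proof-side vocabulary: the edge list and the dictionaries both programs build from it.
def pvEdge (w : String) : Char × Char := (pvFirst w, pvLast w)
def pvEdges (arr : List String) : List (Char × Char) := arr.map pvEdge
def pvIndDict (E : List (Char × Char)) : PySem.Dict Char Int :=
  E.foldl (fun d p => d.modify p.2 0 (· + 1)) PySem.Dict.empty
def pvOutDict (E : List (Char × Char)) : PySem.Dict Char Int :=
  E.foldl (fun d p => d.modify p.1 0 (· + 1)) PySem.Dict.empty
def pvGraphDict (E : List (Char × Char)) : PySem.Dict Char (List Char) :=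
  E.foldl (fun d p => d.modify p.1 [] (· ++ [p.2])) PySem.Dict.empty
def pvBalDict (E : List (Char × Char)) : PySem.Dict Char Int :=
  E.foldl (fun d p =>
    let d := d.insert p.1 (d.getD p.1 0 + 1)
    d.insert p.2 (d.getD p.2 0 - 1)) PySem.Dict.empty
def pvNodes (E : List (Char × Char)) : PySem.Set Char :=
  PySem.Set.union (PySem.Set.ofList (pvIndDict E).keys) (pvOutDict E).keys
def pvSat (E : List (Char × Char)) (vis : PySem.Set Char) : PySem.Set Char :=
  E.foldl (fun v p => if p.1 ∈ vis then PySem.Set.add v p.2 else v) vis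
def pvSatIter (E : List (Char × Char)) (n : Nat) (v : PySem.Set Char) : PySem.Set Char :=
  match n with
  | 0 => v
  | k+1 => pvSat E (pvSatIter E k v)

-- A's build loop is the three independent folds over the edge list
lemma pvBuildA_eq (arr : List String) (d1 d2 : PySem.Dict Char Int) (d3 : PySem.Dict Char (List Char)) :
    arr.foldl
      (fun st word =>
        let s := pvFirst word
        let e := pvLast word
        (st.1.modify e 0 (· + 1), st.2.1.modify s 0 (· + 1), st.2.2.modify s [] (· ++ [e])))
      (d1, d2, d3)
    = ((pvEdges arr).foldl (fun d p => d.modify p.2 0 (· + 1)) d1,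
       (pvEdges arr).foldl (fun d p => d.modify p.1 0 (· + 1)) d2,
       (pvEdges arr).foldl (fun d p => d.modify p.1 [] (· ++ [p.2])) d3) := by
  induction arr generalizing d1 d2 d3 with
  | nil => rfl
  | cons w ws ih => simp [pvEdges, pvEdge, List.foldl_cons, ih]

lemma isCircle_eq (arr : List String) :
    isCircle arr =
      if (pvNodes (pvEdges arr)).any
          (fun c => (pvIndDict (pvEdges arr)).getD c 0 != (pvOutDict (pvEdges arr)).getD c 0) then 0
      else
        if (pvDfsA (pvGraphDict (pvEdges arr)) (2 * arr.length + 1) (pvFirst (arr.headD ""))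
              PySem.Set.empty).length = (pvNodes (pvEdges arr)).length then 1 else 0 := by
  simp only [isCircle, pvBuildA_eq, pvNodes, pvIndDict, pvOutDict, pvGraphDict]
  rfl

lemma range_foldl_sat (E : List (Char × Char)) (n : Nat) (v : PySem.Set Char) :
    (List.range n).foldl
        (fun vis _ => E.foldl (fun v p => if p.1 ∈ vis then PySem.Set.add v p.2 else v) vis) v
      = pvSatIter E n v := by
  induction n with
  | zero => rfl
  | succ k ih => rw [List.range_succ, List.foldl_append, ih]; rfl

lemma isCircle_alt_eq (arr : List String) :
    isCircle_alt arr =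
      if (pvBalDict (pvEdges arr)).values.any (fun v => v != 0) then 0
      else
        if (pvEdges arr).all (fun p =>
              decide (p.1 ∈ pvSatIter (pvEdges arr) (pvBalDict (pvEdges arr)).size
                        (PySem.Set.ofList [pvFirst (arr.headD "")])) &&
              decide (p.2 ∈ pvSatIter (pvEdges arr) (pvBalDict (pvEdges arr)).size
                        (PySem.Set.ofList [pvFirst (arr.headD "")])))
          then 1 else 0 := by
  simp only [isCircle_alt, range_foldl_sat, pvBalDict, pvEdges]
  rfl

-- degree dictionaries: lookups are counts, keys are the endpoint sets
lemma pvIndDict_getD (E : List (Char × Char)) (c : Char) :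
    (pvIndDict E).getD c 0 = ((E.map Prod.snd).count c : Int) := by
  have h := PySem.Dict.getD_foldl_modify_add_one (E.map Prod.snd) PySem.Dict.empty c
  rw [List.foldl_map] at h
  unfold pvIndDict
  simpa using h
lemma pvOutDict_getD (E : List (Char × Char)) (c : Char) :
    (pvOutDict E).getD c 0 = ((E.map Prod.fst).count c : Int) := by
  have h := PySem.Dict.getD_foldl_modify_add_one (E.map Prod.fst) PySem.Dict.empty c
  rw [List.foldl_map] at h
  unfold pvOutDict
  simpa using h
lemma pvIndDict_keys (E : List (Char × Char)) :
    (pvIndDict E).keys = PySem.Set.ofList (E.map Prod.snd) := by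
  have h := PySem.Dict.keys_foldl_modify_key E Prod.snd 0
    (fun _ _ => (· + 1)) (PySem.Dict.empty : PySem.Dict Char Int)
  unfold pvIndDict
  rw [h]
  simp [PySem.Set.update_nil_left]

lemma pvOutDict_keys (E : List (Char × Char)) :
    (pvOutDict E).keys = PySem.Set.ofList (E.map Prod.fst) := by
  have h := PySem.Dict.keys_foldl_modify_key E Prod.fst 0
    (fun _ _ => (· + 1)) (PySem.Dict.empty : PySem.Dict Char Int)
  unfold pvOutDict
  rw [h]
  simp [PySem.Set.update_nil_left]

lemma pvNodes_mem (E : List (Char × Char)) (c : Char) :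
    c ∈ pvNodes E ↔ c ∈ E.map Prod.snd ∨ c ∈ E.map Prod.fst := by
  unfold pvNodes
  rw [pvIndDict_keys, pvOutDict_keys]
  rw [PySem.Set.mem_union]
  simp [PySem.Set.mem_ofList]
lemma pvNodes_nodup (E : List (Char × Char)) : (pvNodes E).Nodup := by
  unfold pvNodes
  exact PySem.Set.nodup_union _ _ (by rw [pvIndDict_keys]; exact PySem.Set.nodup_ofList _)

-- adjacency dictionary membership = edge membership
lemma pvGraphDict_mem (E : List (Char × Char)) (a b : Char) :
    b ∈ (pvGraphDict E).getD a [] ↔ (a, b) ∈ E := by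
  have h := PySem.Dict.getD_foldl_modify_append E PySem.Dict.empty a
  unfold pvGraphDict
  rw [h]
  simp only [PySem.Dict.getD_empty, List.nil_append, List.mem_map, List.mem_filter]
  constructor
  · rintro ⟨⟨x, y⟩, ⟨hmem, heq⟩, rfl⟩
    simp only [beq_iff_eq] at heq
    simpa [heq] using hmem
  · intro hmem
    exact ⟨(a, b), ⟨hmem, by simp⟩, rfl⟩

lemma pvBalFold_getD (E : List (Char × Char)) :
    ∀ (d : PySem.Dict Char Int) (c : Char),
      (E.foldl (fun d p =>
        let d := d.insert p.1 (d.getD p.1 0 + 1)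
        d.insert p.2 (d.getD p.2 0 - 1)) d).getD c 0
      = d.getD c 0 + ((E.map Prod.fst).count c : Int) - ((E.map Prod.snd).count c : Int) := by
  induction E with
  | nil => intro d c; simp
  | cons p E ih =>
    intro d c
    rw [List.foldl_cons, ih]
    simp only [List.map_cons, List.count_cons]
    by_cases h1 : c = p.1 <;> by_cases h2 : c = p.2 <;> by_cases h3 : p.1 = p.2 <;>
      simp [PySem.Dict.getD_insert, h1, h2, h3] <;> (try split_ifs) <;> (try simp_all) <;> omega

lemma pvBalFold_mem_keys (E : List (Char × Char)) :
    ∀ (d : PySem.Dict Char Int) (c : Char),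
      (c ∈ (E.foldl (fun d p =>
        let d := d.insert p.1 (d.getD p.1 0 + 1)
        d.insert p.2 (d.getD p.2 0 - 1)) d).keys)
      ↔ c ∈ d.keys ∨ c ∈ E.map Prod.fst ∨ c ∈ E.map Prod.snd := by
  induction E with
  | nil => intro d c; simp
  | cons p E ih =>
    intro d c
    rw [List.foldl_cons, ih]
    simp only [PySem.Dict.mem_keys_insert, List.map_cons, List.mem_cons]
    tauto

lemma pvBalFold_nodup_keys (E : List (Char × Char)) :
    ∀ (d : PySem.Dict Char Int), d.keys.Nodup →
      (E.foldl (fun d p =>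
        let d := d.insert p.1 (d.getD p.1 0 + 1)
        d.insert p.2 (d.getD p.2 0 - 1)) d).keys.Nodup := by
  induction E with
  | nil => intro d h; exact h
  | cons p E ih =>
    intro d h
    rw [List.foldl_cons]
    exact ih _ (PySem.Dict.nodup_keys_insert _ _ _ (PySem.Dict.nodup_keys_insert _ _ _ h))

-- balance dictionary: lookup is out-count minus in-count, keys are the endpoint set
lemma pvBalDict_getD (E : List (Char × Char)) (c : Char) :
    (pvBalDict E).getD c 0 = ((E.map Prod.fst).count c : Int) - ((E.map Prod.snd).count c : Int) := by
  unfold pvBalDict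
  rw [pvBalFold_getD]
  simp
lemma pvBalDict_mem_keys (E : List (Char × Char)) (c : Char) :
    c ∈ (pvBalDict E).keys ↔ c ∈ E.map Prod.fst ∨ c ∈ E.map Prod.snd := by
  unfold pvBalDict
  rw [pvBalFold_mem_keys]
  simp
lemma pvBalDict_nodup_keys (E : List (Char × Char)) : (pvBalDict E).keys.Nodup := by
  unfold pvBalDict
  exact pvBalFold_nodup_keys E _ (by simp [PySem.Dict.keys_empty])

-- the two early-exit guards are the same test
lemma pvGuard_iff (E : List (Char × Char)) :
    ((pvNodes E).any (fun c => (pvIndDict E).getD c 0 != (pvOutDict E).getD c 0) = true)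
      ↔ ((pvBalDict E).values.any (fun v => v != 0) = true) := by
  rw [PySem.Dict.values_eq_map_keys _ (pvBalDict_nodup_keys E) 0]
  simp only [List.any_eq_true, List.any_map, Function.comp, bne_iff_ne, ne_eq]
  constructor
  · rintro ⟨c, hc, hne⟩
    refine ⟨c, ?_, ?_⟩
    · rw [pvBalDict_mem_keys]
      rw [pvNodes_mem] at hc
      tauto
    · rw [pvBalDict_getD]
      rw [pvIndDict_getD, pvOutDict_getD] at hne
      omega
  · rintro ⟨c, hc, hne⟩
    refine ⟨c, ?_, ?_⟩
    · rw [pvNodes_mem]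
      rw [pvBalDict_mem_keys] at hc
      tauto
    · rw [pvIndDict_getD, pvOutDict_getD]
      rw [pvBalDict_getD] at hne
      omega

-- generic: a fold whose step only grows the accumulator grows it
lemma pvFoldl_superset {α : Type} (f : PySem.Set Char → α → PySem.Set Char)
    (h : ∀ v a, v ⊆ f v a) : ∀ (l : List α) (v : PySem.Set Char), v ⊆ l.foldl f v := by
  intro l
  induction l with
  | nil => intro v; exact fun _ hx => hx
  | cons a l ih => intro v; exact List.Subset.trans (h v a) (ih (f v a))

-- generic: a property preserved by each listed step is preserved by the fold
lemma pvFoldl_pres {α : Type} (P : PySem.Set Char → Prop) (f : PySem.Set Char → α → PySem.Set Char) :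
    ∀ (l : List α), (∀ v a, a ∈ l → P v → P (f v a)) → ∀ v, P v → P (l.foldl f v) := by
  intro l
  induction l with
  | nil => intro _ v hv; exact hv
  | cons a l ih =>
    intro h v hv
    exact ih (fun v b hb => h v b (by simp [hb])) (f v a) (h v a (by simp) hv)

-- saturation step: monotone, membership characterisation, appends only, keeps Nodup
lemma pvSat_subset (E : List (Char × Char)) (vis : PySem.Set Char) : vis ⊆ pvSat E vis := by
  apply pvFoldl_superset
  intro v p
  by_cases h : p.1 ∈ vis
  · simp only [if_pos h]
    intro x hx
    rw [PySem.Set.mem_add]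
    exact Or.inl hx
  · simp [h]

lemma pvSat_mem_aux (vis : PySem.Set Char) :
    ∀ (E : List (Char × Char)) (v0 : PySem.Set Char) (x : Char),
      x ∈ E.foldl (fun v p => if p.1 ∈ vis then PySem.Set.add v p.2 else v) v0
        ↔ x ∈ v0 ∨ ∃ p ∈ E, p.1 ∈ vis ∧ x = p.2 := by
  intro E
  induction E with
  | nil => intro v0 x; simp
  | cons p E ih =>
    intro v0 x
    rw [List.foldl_cons]
    by_cases h : p.1 ∈ vis
    · simp only [if_pos h, ih, PySem.Set.mem_add, List.mem_cons]
      constructor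
      · rintro (⟨hv | rfl⟩ | ⟨q, hq, hq1, rfl⟩)
        · exact Or.inl hv
        · exact Or.inr ⟨p, Or.inl rfl, h, rfl⟩
        · exact Or.inr ⟨q, Or.inr hq, hq1, rfl⟩
      · rintro (hv | ⟨q, hq | hq, hq1, rfl⟩)
        · exact Or.inl (Or.inl hv)
        · subst hq; exact Or.inl (Or.inr rfl)
        · exact Or.inr ⟨q, hq, hq1, rfl⟩
    · simp only [if_neg h, ih, List.mem_cons]
      constructor
      · rintro (hv | ⟨q, hq, hq1, rfl⟩)
        · exact Or.inl hv
        · exact Or.inr ⟨q, Or.inr hq, hq1, rfl⟩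
      · rintro (hv | ⟨q, hq | hq, hq1, rfl⟩)
        · exact Or.inl hv
        · subst hq; exact absurd hq1 h
        · exact Or.inr ⟨q, hq, hq1, rfl⟩

lemma pvSat_mem (E : List (Char × Char)) (vis : PySem.Set Char) (x : Char) :
    x ∈ pvSat E vis ↔ x ∈ vis ∨ ∃ p ∈ E, p.1 ∈ vis ∧ x = p.2 :=
  pvSat_mem_aux vis E vis x

lemma pvSat_append_aux (vis : PySem.Set Char) :
    ∀ (E : List (Char × Char)) (v0 : PySem.Set Char),
      ∃ ext, E.foldl (fun v p => if p.1 ∈ vis then PySem.Set.add v p.2 else v) v0 = v0 ++ ext := by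
  intro E
  induction E with
  | nil => intro v0; exact ⟨[], by simp⟩
  | cons p E ih =>
    intro v0
    rw [List.foldl_cons]
    by_cases h : p.1 ∈ vis
    · rw [if_pos h, PySem.Set.add_eq_ite]
      by_cases h2 : p.2 ∈ v0
      · rw [if_pos h2]; exact ih v0
      · rw [if_neg h2]
        obtain ⟨ext, he⟩ := ih (v0 ++ [p.2])
        exact ⟨[p.2] ++ ext, by rw [he, List.append_assoc]⟩
    · rw [if_neg h]; exact ih v0

lemma pvSat_append (E : List (Char × Char)) (vis : PySem.Set Char) :
    ∃ ext, pvSat E vis = vis ++ ext :=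
  pvSat_append_aux vis E vis

lemma pvSat_nodup (E : List (Char × Char)) (vis : PySem.Set Char) (h : vis.Nodup) :
    (pvSat E vis).Nodup := by
  apply pvFoldl_pres (fun v => v.Nodup) _ E _ vis h
  intro v p _ hv
  by_cases hm : p.1 ∈ vis
  · rw [if_pos hm]; exact PySem.Set.nodup_add v p.2 hv
  · rw [if_neg hm]; exact hv

lemma pvSatIter_subset (E : List (Char × Char)) (n : Nat) (v : PySem.Set Char) :
    v ⊆ pvSatIter E n v := by
  induction n with
  | zero => exact fun _ hx => hx
  | succ k ih => exact List.Subset.trans ih (pvSat_subset E (pvSatIter E k v))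

lemma pvSatIter_nodup (E : List (Char × Char)) (n : Nat) (v : PySem.Set Char) (h : v.Nodup) :
    (pvSatIter E n v).Nodup := by
  induction n with
  | zero => exact h
  | succ k ih => exact pvSat_nodup E _ ih

-- a Nodup list contained in another list is no longer than it
lemma pvNodup_length_le (V U : List Char) (hV : V.Nodup) (h : ∀ x ∈ V, x ∈ U) :
    V.length ≤ U.length := by
  calc V.length = V.toFinset.card := by rw [List.toFinset_card_of_nodup hV]
    _ ≤ U.toFinset.card := Finset.card_le_card (fun x hx => by
        rw [List.mem_toFinset] at *; exact h x hx)
    _ ≤ U.length := List.toFinset_card_le U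

-- after |U| rounds the saturation is a fixpoint
lemma pvSatIter_fix (E : List (Char × Char)) (U : List Char) (_hU : U.Nodup) (s : Char)
    (hsub : ∀ k, pvSatIter E k [s] ⊆ U) (n : Nat) (hn : U.length ≤ n) :
    pvSat E (pvSatIter E n [s]) = pvSatIter E n [s] := by
  have hnodup : ∀ k, (pvSatIter E k [s]).Nodup := fun k => pvSatIter_nodup E k [s] (by simp)
  have key : ∀ k, k + 1 ≤ (pvSatIter E k [s]).length ∨
      pvSat E (pvSatIter E k [s]) = pvSatIter E k [s] := by
    intro k
    induction k with
    | zero => left; simp [pvSatIter]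
    | succ k ihk =>
      rcases ihk with hlen | hfix
      · by_cases heq : pvSat E (pvSatIter E k [s]) = pvSatIter E k [s]
        · right
          show pvSat E (pvSat E (pvSatIter E k [s])) = pvSat E (pvSatIter E k [s])
          rw [heq]
          exact heq
        · left
          obtain ⟨ext, he⟩ := pvSat_append E (pvSatIter E k [s])
          have hne : ext ≠ [] := by
            intro h0
            exact heq (by rw [he, h0, List.append_nil])
          have hlp : 1 ≤ ext.length := List.length_pos_iff.mpr hne
          have : pvSatIter E (k+1) [s] = pvSatIter E k [s] ++ ext := he
          rw [this, List.length_append]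
          omega
      · right
        rw [show pvSatIter E (k+1) [s] = pvSatIter E k [s] from hfix]
        exact hfix
  rcases key n with hlen | hfix
  · exfalso
    have h1 : (pvSatIter E n [s]).length ≤ U.length :=
      pvNodup_length_le _ _ (hnodup n) (hsub n)
    omega
  · exact hfix

-- the body of A's dfs loop at remaining fuel f
def pvStep (g : PySem.Dict Char (List Char)) (f : Nat) : PySem.Set Char → Char → PySem.Set Char :=
  fun v nb => if nb ∈ v then v else pvDfsA g f nb v

-- DFS: monotone, keeps Nodup, stays inside any closed superset, and with enough fuel
-- returns a set closed under the adjacency lists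
lemma pvDfsA_mono (g : PySem.Dict Char (List Char)) :
    ∀ (fuel : Nat) (node : Char) (vis : PySem.Set Char), vis ⊆ pvDfsA g fuel node vis := by
  intro fuel
  induction fuel with
  | zero => intro node vis; exact fun _ hx => hx
  | succ f ih =>
    intro node vis
    show vis ⊆ (g.getD node []).foldl (pvStep g f) (PySem.Set.add vis node)
    refine List.Subset.trans ?_ (pvFoldl_superset _ ?_ _ _)
    · intro x hx; rw [PySem.Set.mem_add]; exact Or.inl hx
    · intro v nb
      unfold pvStep
      by_cases h : nb ∈ v
      · simp [h]
      · simp only [if_neg h]; exact ih nb v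

lemma pvDfsA_nodup (g : PySem.Dict Char (List Char)) :
    ∀ (fuel : Nat) (node : Char) (vis : PySem.Set Char), vis.Nodup → (pvDfsA g fuel node vis).Nodup := by
  intro fuel
  induction fuel with
  | zero => intro node vis h; exact h
  | succ f ih =>
    intro node vis h
    show ((g.getD node []).foldl (pvStep g f) (PySem.Set.add vis node)).Nodup
    apply pvFoldl_pres (fun v => v.Nodup) _ _ ?_ _ (PySem.Set.nodup_add vis node h)
    intro v nb _ hv
    unfold pvStep
    by_cases hm : nb ∈ v
    · simpa [hm] using hv
    · simp only [if_neg hm]; exact ih nb v hv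

lemma pvDfsA_bounded (g : PySem.Dict Char (List Char)) (C : List Char)
    (hC : ∀ a b, b ∈ g.getD a [] → a ∈ C → b ∈ C) :
    ∀ (fuel : Nat) (node : Char) (vis : PySem.Set Char), node ∈ C → (∀ x ∈ vis, x ∈ C) →
      ∀ x ∈ pvDfsA g fuel node vis, x ∈ C := by
  intro fuel
  induction fuel with
  | zero => intro node vis _ hvis; exact hvis
  | succ f ih =>
    intro node vis hnode hvis
    show ∀ x ∈ (g.getD node []).foldl (pvStep g f) (PySem.Set.add vis node), x ∈ C
    apply pvFoldl_pres (fun v => ∀ x ∈ v, x ∈ C) _ _ ?_ _ ?_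
    · intro v nb hnb hv
      unfold pvStep
      by_cases hm : nb ∈ v
      · simpa [hm] using hv
      · simp only [if_neg hm]
        exact ih nb v (hC node nb hnb hnode) hv
    · intro x hx
      rw [PySem.Set.mem_add] at hx
      rcases hx with h | rfl
      · exact hvis x h
      · exact hnode

lemma pvDfsA_closed (g : PySem.Dict Char (List Char)) (U : List Char)
    (hg : ∀ a b, b ∈ g.getD a [] → b ∈ U) :
    ∀ (fuel : Nat) (node : Char) (vis : PySem.Set Char), node ∈ U → node ∉ vis →
      (U.toFinset \ vis.toFinset).card < fuel →
      vis ⊆ pvDfsA g fuel node vis ∧ node ∈ pvDfsA g fuel node vis ∧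
        ∀ x ∈ pvDfsA g fuel node vis, x ∈ vis ∨
          ∀ b ∈ g.getD x [], b ∈ pvDfsA g fuel node vis := by
  intro fuel
  induction fuel with
  | zero => intro node vis _ _ hcard; omega
  | succ f ih =>
    intro node vis hnodeU hnodevis hcard
    have hstepmono : ∀ (v : PySem.Set Char) (nb : Char), v ⊆ pvStep g f v nb := by
      intro v nb
      unfold pvStep
      by_cases h : nb ∈ v
      · simp [h]
      · simp only [if_neg h]; exact pvDfsA_mono g f nb v
    have hfoldmono : ∀ (l : List Char) (v : PySem.Set Char), v ⊆ l.foldl (pvStep g f) v :=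
      fun l v => pvFoldl_superset _ hstepmono l v
    have key : ∀ (l : List Char), (∀ nb ∈ l, nb ∈ U) →
        ∀ v : PySem.Set Char, vis ⊆ v → node ∈ v →
          (∀ x ∈ v, x ∈ vis ∨ x = node ∨ ∀ b ∈ g.getD x [], b ∈ v) →
          (vis ⊆ l.foldl (pvStep g f) v ∧ node ∈ l.foldl (pvStep g f) v ∧
            (∀ x ∈ l.foldl (pvStep g f) v,
              x ∈ vis ∨ x = node ∨ ∀ b ∈ g.getD x [], b ∈ l.foldl (pvStep g f) v))
          ∧ ∀ nb ∈ l, nb ∈ l.foldl (pvStep g f) v := by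
      intro l
      induction l with
      | nil =>
        intro _ v h1 h2 h3
        exact ⟨⟨h1, h2, h3⟩, by simp⟩
      | cons nb l ihl =>
        intro hlU v h1 h2 h3
        have hnbU : nb ∈ U := hlU nb (by simp)
        have hstep : (vis ⊆ pvStep g f v nb ∧ node ∈ pvStep g f v nb ∧
            (∀ x ∈ pvStep g f v nb,
              x ∈ vis ∨ x = node ∨ ∀ b ∈ g.getD x [], b ∈ pvStep g f v nb))
            ∧ nb ∈ pvStep g f v nb := by
          by_cases hm : nb ∈ v
          · have hv' : pvStep g f v nb = v := by simp [pvStep, hm]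
            rw [hv']; exact ⟨⟨h1, h2, h3⟩, hm⟩
          · have hv' : pvStep g f v nb = pvDfsA g f nb v := by simp [pvStep, hm]
            rw [hv']
            have hcard' : (U.toFinset \ v.toFinset).card < f := by
              have hsubF : U.toFinset \ v.toFinset ⊆ (U.toFinset \ vis.toFinset).erase node := by
                intro x hx
                rw [Finset.mem_sdiff] at hx
                rw [Finset.mem_erase, Finset.mem_sdiff]
                refine ⟨?_, hx.1, ?_⟩
                · intro h0; subst h0; exact hx.2 (List.mem_toFinset.mpr h2)
                · intro h0
                  exact hx.2 (List.mem_toFinset.mpr (h1 (List.mem_toFinset.mp h0)))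
              have hnF : node ∈ U.toFinset \ vis.toFinset := by
                rw [Finset.mem_sdiff, List.mem_toFinset, List.mem_toFinset]
                exact ⟨hnodeU, hnodevis⟩
              have hc1 := Finset.card_le_card hsubF
              have hc2 := Finset.card_erase_of_mem hnF
              have hc3 : 0 < (U.toFinset \ vis.toFinset).card := Finset.card_pos.mpr ⟨node, hnF⟩
              omega
            obtain ⟨hA, hB, hCc⟩ := ih nb v hnbU hm hcard'
            refine ⟨⟨List.Subset.trans h1 hA, hA h2, ?_⟩, hB⟩
            intro x hx
            rcases hCc x hx with hxv | hclo
            · rcases h3 x hxv with hh | hh | hh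
              · exact Or.inl hh
              · exact Or.inr (Or.inl hh)
              · exact Or.inr (Or.inr (fun b hb => hA (hh b hb)))
            · exact Or.inr (Or.inr hclo)
        obtain ⟨⟨k1, k2, k3⟩, knb⟩ := hstep
        obtain ⟨⟨m1, m2, m3⟩, mall⟩ :=
          ihl (fun b hb => hlU b (by simp [hb])) (pvStep g f v nb) k1 k2 k3
        refine ⟨⟨m1, m2, m3⟩, ?_⟩
        intro b hb
        rcases List.mem_cons.mp hb with rfl | hbl
        · exact hfoldmono l (pvStep g f v b) knb
        · exact mall b hbl
    have hgl : ∀ nb ∈ g.getD node [], nb ∈ U := fun nb hnb => hg node nb hnb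
    obtain ⟨⟨r1, r2, r3⟩, rall⟩ := key (g.getD node []) hgl (PySem.Set.add vis node)
      (fun x hx => by rw [PySem.Set.mem_add]; exact Or.inl hx)
      (by rw [PySem.Set.mem_add]; exact Or.inr rfl)
      (by intro x hx; rw [PySem.Set.mem_add] at hx; tauto)
    refine ⟨r1, r2, ?_⟩
    intro x hx
    rcases r3 x hx with hh | hh | hh
    · exact Or.inl hh
    · subst hh; exact Or.inr (fun b hb => rall b hb)
    · exact Or.inr hh

-- two Nodup lists, one included in the other: equal lengths iff equal membership
lemma pvNodup_len_iff (V U : List Char) (hVU : ∀ x ∈ V, x ∈ U) (hV : V.Nodup) (hU : U.Nodup) :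
    (V.length = U.length ↔ ∀ x ∈ U, x ∈ V) := by
  constructor
  · intro hlen x hxU
    have hsub : V.toFinset ⊆ U.toFinset := fun y hy => by
      rw [List.mem_toFinset] at *; exact hVU y hy
    have heq : V.toFinset = U.toFinset := by
      apply Finset.eq_of_subset_of_card_le hsub
      rw [List.toFinset_card_of_nodup hV, List.toFinset_card_of_nodup hU, hlen]
    rw [← List.mem_toFinset, ← heq, List.mem_toFinset] at hxU
    exact hxU
  · intro hUV
    exact Nat.le_antisymm (pvNodup_length_le V U hV hVU) (pvNodup_length_le U V hU hUV)

-- ===== VERDICT (by name: the statement is the Claim_ definition above) =====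
theorem isCircle_spec : Claim_equal_isCircle := by
  intro arr _hdom hpre
  obtain ⟨hne, _hwords⟩ := hpre
  unfold Spec_isCircle
  rw [isCircle_eq, isCircle_alt_eq]
  have hguard := pvGuard_iff (pvEdges arr)
  by_cases hb : ((pvBalDict (pvEdges arr)).values.any (fun v => v != 0)) = true
  · rw [if_pos (hguard.mpr hb), if_pos hb]
  · rw [if_neg (fun h => hb (hguard.mp h)), if_neg hb]
    have hstart : PySem.Set.ofList [pvFirst (arr.headD "")] = [pvFirst (arr.headD "")] := rfl
    rw [hstart]
    set E := pvEdges arr with hE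
    set s := pvFirst (arr.headD "") with hs
    set U := pvNodes E with hU
    set G := pvGraphDict E with hG
    set n := (pvBalDict E).size with hn
    set VA := pvDfsA G (2 * arr.length + 1) s PySem.Set.empty with hVA
    set VB := pvSatIter E n [s] with hVB
    -- s is a node
    have hsU : s ∈ U := by
      obtain ⟨w, ws, hw⟩ := List.exists_cons_of_ne_nil hne
      rw [hU, pvNodes_mem]
      right
      rw [hE, hs, hw]
      simp [pvEdges, pvEdge]
    have hUnodup : U.Nodup := pvNodes_nodup E
    -- the node set is small
    have hUlen : U.length ≤ 2 * arr.length := by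
      have hmem : ∀ x ∈ U, x ∈ E.map Prod.snd ++ E.map Prod.fst := by
        intro x hx
        rw [hU, pvNodes_mem] at hx
        rw [List.mem_append]
        exact hx
      have := pvNodup_length_le U (E.map Prod.snd ++ E.map Prod.fst) hUnodup hmem
      rw [List.length_append, List.length_map, List.length_map, hE] at this
      simp only [pvEdges, List.length_map] at this
      omega
    -- the balance dict has exactly the nodes as keys
    have hkeysU : ∀ c, c ∈ (pvBalDict E).keys ↔ c ∈ U := by
      intro c
      rw [pvBalDict_mem_keys, hU, pvNodes_mem]
      tauto
    have hnsize : n = U.length := by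
      have h1 : n = (pvBalDict E).keys.length := by
        rw [hn]
        simp [PySem.Dict.size, PySem.Dict.keys]
      rw [h1]
      exact Nat.le_antisymm
        (pvNodup_length_le _ _ (pvBalDict_nodup_keys E) (fun x hx => (hkeysU x).mp hx))
        (pvNodup_length_le _ _ hUnodup (fun x hx => (hkeysU x).mpr hx))
    have hGmem : ∀ a b, b ∈ G.getD a [] ↔ (a, b) ∈ E := fun a b => pvGraphDict_mem E a b
    have hGU : ∀ a b, b ∈ G.getD a [] → b ∈ U := by
      intro a b hb
      rw [hU, pvNodes_mem]
      left
      rw [hGmem] at hb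
      exact List.mem_map.mpr ⟨(a, b), hb, rfl⟩
    -- saturation stays inside U and reaches a fixpoint
    have hiterU : ∀ k, pvSatIter E k [s] ⊆ U := by
      intro k
      induction k with
      | zero =>
        intro x hx
        rw [show pvSatIter E 0 [s] = [s] from rfl, List.mem_singleton] at hx
        subst hx
        exact hsU
      | succ k ih =>
        intro x hx
        rw [show pvSatIter E (k+1) [s] = pvSat E (pvSatIter E k [s]) from rfl, pvSat_mem] at hx
        rcases hx with h | ⟨p, hp, _, rfl⟩
        · exact ih h
        · rw [hU, pvNodes_mem]
          left
          exact List.mem_map.mpr ⟨p, hp, rfl⟩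
    have hfix : pvSat E VB = VB :=
      pvSatIter_fix E U hUnodup s hiterU n (le_of_eq hnsize.symm)
    have hVBclosed : ∀ p ∈ E, p.1 ∈ VB → p.2 ∈ VB := by
      intro p hp h1
      rw [← hfix, pvSat_mem]
      exact Or.inr ⟨p, hp, h1, rfl⟩
    have hsVB : s ∈ VB := pvSatIter_subset E n [s] (List.mem_singleton.mpr rfl)
    -- DFS facts
    have hemp : s ∉ (PySem.Set.empty : PySem.Set Char) := by simp [PySem.Set.empty]
    have hcardfuel : (U.toFinset \ (PySem.Set.empty : PySem.Set Char).toFinset).card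
        < 2 * arr.length + 1 := by
      have h1 : (PySem.Set.empty : PySem.Set Char).toFinset = ∅ := rfl
      rw [h1, Finset.sdiff_empty]
      have := List.toFinset_card_le U
      omega
    obtain ⟨_, hsVA, hVAclo⟩ :=
      pvDfsA_closed G U hGU (2 * arr.length + 1) s PySem.Set.empty hsU hemp hcardfuel
    have hVAnodup : VA.Nodup :=
      pvDfsA_nodup G (2 * arr.length + 1) s PySem.Set.empty (by simp [PySem.Set.empty])
    have hVAU : ∀ x ∈ VA, x ∈ U :=
      pvDfsA_bounded G U (fun a b hb _ => hGU a b hb) (2 * arr.length + 1) s PySem.Set.empty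
        hsU (by simp [PySem.Set.empty])
    have hVAVB : ∀ x ∈ VA, x ∈ VB :=
      pvDfsA_bounded G VB (fun a b hb ha => hVBclosed (a, b) ((hGmem a b).mp hb) ha)
        (2 * arr.length + 1) s PySem.Set.empty hsVB (by simp [PySem.Set.empty])
    have hVBVA : ∀ x ∈ VB, x ∈ VA := by
      have hiter : ∀ k, ∀ x ∈ pvSatIter E k [s], x ∈ VA := by
        intro k
        induction k with
        | zero =>
          intro x hx
          rw [show pvSatIter E 0 [s] = [s] from rfl, List.mem_singleton] at hx
          subst hx
          exact hsVA
        | succ k ih =>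
          intro x hx
          rw [show pvSatIter E (k+1) [s] = pvSat E (pvSatIter E k [s]) from rfl, pvSat_mem] at hx
          rcases hx with h | ⟨p, hp, h1, rfl⟩
          · exact ih x h
          · rcases hVAclo p.1 (ih p.1 h1) with habs | hclo
            · exact absurd habs (by simp [PySem.Set.empty])
            · exact hclo p.2 ((hGmem p.1 p.2).mpr (by simpa using hp))
      exact hiter n
    -- the two final tests agree
    have hAiff : (VA.length = U.length) ↔ (∀ x ∈ U, x ∈ VA) :=
      pvNodup_len_iff VA U hVAU hVAnodup hUnodup
    have hBiff : (E.all (fun p => decide (p.1 ∈ VB) && decide (p.2 ∈ VB)) = true)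
        ↔ (∀ x ∈ U, x ∈ VA) := by
      rw [List.all_eq_true]
      constructor
      · intro h x hxU
        rw [hU, pvNodes_mem] at hxU
        rcases hxU with hx | hx
        · obtain ⟨p, hp, rfl⟩ := List.mem_map.mp hx
          have := h p hp
          simp only [Bool.and_eq_true, decide_eq_true_eq] at this
          exact hVBVA _ this.2
        · obtain ⟨p, hp, rfl⟩ := List.mem_map.mp hx
          have := h p hp
          simp only [Bool.and_eq_true, decide_eq_true_eq] at this
          exact hVBVA _ this.1
      · intro h p hp
        simp only [Bool.and_eq_true, decide_eq_true_eq]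
        constructor
        · refine hVAVB _ (h p.1 ?_)
          rw [hU, pvNodes_mem]
          right
          exact List.mem_map.mpr ⟨p, hp, rfl⟩
        · refine hVAVB _ (h p.2 ?_)
          rw [hU, pvNodes_mem]
          left
          exact List.mem_map.mpr ⟨p, hp, rfl⟩
    by_cases hA : VA.length = U.length
    · rw [if_pos hA, if_pos (hBiff.mpr (hAiff.mp hA))]
    · rw [if_neg hA, if_neg (fun hBt => hA (hAiff.mpr (hBiff.mp hBt)))]
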